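-- pv_equiv track=rewrite | github.com/jolieschae/Phase-3-Sims-4-Game-Mod | game/decompile/base/lib/subprocess.py | list2cmdline
-- ===== SOURCE A (Python) =====
-- def list2cmdline(seq):
--     result = []
--     needquote = False
--     for arg in seq:
--         bs_buf = []
--         if result:
--             result.append(' ')
--         needquote = ' ' in arg or '\t' in arg or not arg
--         if needquote:
--             result.append('"')
--         for c in arg:
--             if c == '\\':
--                 bs_buf.append(c)
--             elif c == '"':
--                 result.append('\\' * len(bs_buf) * 2)
--                 bs_buf = []
--                 result.append('\\"')
--             else:
--                 if bs_buf:
--                     result.extend(bs_buf)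
--                     bs_buf = []
--                 result.append(c)
--
--         if bs_buf:
--             result.extend(bs_buf)
--         if needquote:
--             result.extend(bs_buf)
--             result.append('"')
--
--     return ''.join(result)
-- ===== SOURCE B (Python) =====
-- def _dbl(s):
--     n = len(s) - len(s.rstrip('\\'))
--     return s + '\\' * n
--
-- def _quote(arg):
--     needquote = ' ' in arg or '\t' in arg or not arg
--     pieces = arg.split('"')
--     escaped = ''.join(_dbl(p) + '\\"' for p in pieces[:-1]) + pieces[-1]
--     if needquote:
--         return '"' + _dbl(escaped) + '"'
--     return escaped
--
-- def list2cmdline(seq):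
--     return ' '.join(_quote(arg) for arg in seq)
-- ===== Notes on version B (the rewrite author's own statement) =====
-- stated objective: idiomatic
-- what changed: Replaces the single char-by-char scan with a mutable bs_buf backslash buffer by a per-argument map-and-join: each argument is split on '"', backslash runs before quotes (and, when quoting is needed, the trailing run) are doubled by a helper, the pieces are re-joined with '\\"', and the quoted arguments are joined with spaces.
import Mathlib
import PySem

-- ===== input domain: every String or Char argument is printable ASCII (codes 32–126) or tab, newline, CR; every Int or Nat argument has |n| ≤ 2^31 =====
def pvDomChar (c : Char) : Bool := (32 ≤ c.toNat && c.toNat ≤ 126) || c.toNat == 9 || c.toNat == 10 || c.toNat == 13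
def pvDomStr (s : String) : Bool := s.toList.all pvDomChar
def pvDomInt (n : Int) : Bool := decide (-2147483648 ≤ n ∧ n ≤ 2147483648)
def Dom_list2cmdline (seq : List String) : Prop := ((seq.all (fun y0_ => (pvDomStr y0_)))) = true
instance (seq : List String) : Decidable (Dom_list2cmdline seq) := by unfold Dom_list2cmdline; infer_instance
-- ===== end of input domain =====

-- B replaces A's char-by-char scan with a mutable backslash buffer by a per-argument
-- split-on-quote / double-backslash-runs / join pipeline (objective: more idiomatic).

-- ===== PORT A =====
-- one iteration of A's outer loop; result and arg are the strings as char lists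
-- (' ' in arg / '\t' in arg have single-char needles, so they are char membership)
-- the body of A's inner character loop (state: result so far, bs_buf)
def pvAChar (st : List Char × List Char) (c : Char) : List Char × List Char :=
  if c = '\\' then (st.1, st.2 ++ ['\\'])
  else if c = '"' then (st.1 ++ List.replicate (st.2.length * 2) '\\' ++ ['\\', '"'], [])
  else if st.2.isEmpty then (st.1 ++ [c], [])
  else (st.1 ++ st.2 ++ [c], [])

def pvAStep (result : List Char) (arg : List Char) : List Char :=
  let result := if result.isEmpty then result else result ++ [' ']
  let needquote := arg.contains ' ' || arg.contains '\t' || arg.isEmpty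
  let result := if needquote then result ++ ['"'] else result
  let p := arg.foldl pvAChar (result, ([] : List Char))
  let result := if p.2.isEmpty then p.1 else p.1 ++ p.2
  if needquote then result ++ p.2 ++ ['"'] else result

def list2cmdline (seq : List String) : String :=
  String.mk (seq.foldl (fun r arg => pvAStep r arg.toList) [])

-- ===== PORT B =====
-- Source B's _dbl: append one more copy of the trailing backslash run (rstrip-count, exact)
def pvDbl (s : List Char) : List Char :=
  s ++ List.replicate (s.reverse.takeWhile (· = '\\')).length '\\'

-- Source B's arg.split('"'): hand port of str.split with a one-char separator (exact)
def pvSplitQ : List Char → List (List Char)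
  | [] => [[]]
  | c :: cs =>
    match pvSplitQ cs with
    | [] => [[]]
    | p :: ps => if c = '"' then [] :: p :: ps else (c :: p) :: ps

-- Source B's _quote
def pvQuote (arg : List Char) : List Char :=
  let needquote := arg.contains ' ' || arg.contains '\t' || arg.isEmpty
  let pieces := pvSplitQ arg
  let escaped := (pieces.dropLast.map (fun p => pvDbl p ++ ['\\', '"'])).flatten ++ pieces.getLastD []
  if needquote then '"' :: (pvDbl escaped ++ ['"']) else escaped

def list2cmdline_alt (seq : List String) : String :=
  String.mk (List.intercalate [' '] (seq.map (fun a => pvQuote a.toList)))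

-- ===== PRECONDITION & SPEC =====
def Spec_list2cmdline (seq : List String) (out : String) : Prop := out = list2cmdline_alt seq
instance (seq : List String) (out : String) : Decidable (Spec_list2cmdline seq out) := by unfold Spec_list2cmdline; infer_instance

-- ===== CLAIM (what is proved, stated in full; the proofs are below) =====
def Claim_equal_list2cmdline : Prop := ∀ (seq : List String), Dom_list2cmdline seq → Spec_list2cmdline seq (list2cmdline seq)

-- ===== LEMMAS AND PROOFS =====

-- the trailing backslash run of a char list
def pvTrail (l : List Char) : List Char := (l.reverse.takeWhile (· = '\\')).reverse

-- spec of A's inner loop: chars emitted to result, given k pending backslashes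
def pvBody : Nat → List Char → List Char
  | _, [] => []
  | k, c :: cs =>
    if c = '\\' then pvBody (k + 1) cs
    else if c = '"' then List.replicate (k * 2) '\\' ++ '\\' :: '"' :: pvBody 0 cs
    else List.replicate k '\\' ++ c :: pvBody 0 cs

-- B's quote-escaped content of one argument
def pvEsc (l : List Char) : List Char :=
  ((pvSplitQ l).dropLast.map (fun p => pvDbl p ++ ['\\', '"'])).flatten ++ (pvSplitQ l).getLastD []

theorem pvTW_stop (as bs : List Char) (c : Char) (hc : c ≠ '\\') :
    List.takeWhile (· = '\\') (as ++ c :: bs) = List.takeWhile (· = '\\') as := by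
  induction as with
  | nil => simp [hc]
  | cons a as ih =>
    by_cases ha : a = '\\' <;> simp [ha, ih]

theorem pvTrail_mid (xs ys : List Char) (c : Char) (hc : c ≠ '\\') :
    pvTrail (xs ++ c :: ys) = pvTrail ys := by
  simp only [pvTrail, List.reverse_append, List.reverse_cons, List.append_assoc,
    List.singleton_append]
  rw [pvTW_stop _ _ _ hc]

theorem pvTrail_repl (k : Nat) : pvTrail (List.replicate k '\\') = List.replicate k '\\' := by
  simp [pvTrail]

theorem pvTrail_append_repl (xs : List Char) (m : Nat) :
    pvTrail (xs ++ List.replicate m '\\') = pvTrail xs ++ List.replicate m '\\' := by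
  simp [pvTrail]

theorem pvTrail_eq_replicate (l : List Char) :
    pvTrail l = List.replicate (l.reverse.takeWhile (· = '\\')).length '\\' := by
  rw [pvTrail, List.eq_replicate_iff]
  constructor
  · simp
  · intro b hb
    have := List.mem_takeWhile_imp (List.mem_reverse.mp hb)
    simpa using this

theorem pvDbl_eq (l : List Char) : pvDbl l = l ++ pvTrail l := by
  rw [pvDbl, ← pvTrail_eq_replicate]

theorem pvTrail_append_right (xs bs : List Char) (hne : bs ≠ []) (ht : pvTrail bs = []) :
    pvTrail (xs ++ bs) = [] := by
  have hrev : bs.reverse ≠ [] := by simpa using hne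
  obtain ⟨b, r, hbr⟩ := List.exists_cons_of_ne_nil hrev
  have hb : ¬ (b = '\\') := by
    intro h
    rw [pvTrail, hbr, List.takeWhile_cons] at ht
    simp [h] at ht
  simp [pvTrail, List.reverse_append, hbr, hb]

theorem pvSplitQ_ne_nil (l : List Char) : pvSplitQ l ≠ [] := by
  cases l with
  | nil => simp [pvSplitQ]
  | cons c cs =>
    simp only [pvSplitQ]
    cases pvSplitQ cs with
    | nil => simp
    | cons p ps => by_cases h : c = '"' <;> simp [h]

theorem pvSplitQ_prepend (xs l : List Char) (hxs : ∀ c ∈ xs, c ≠ '"') (p : List Char)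
    (ps : List (List Char)) (h : pvSplitQ l = p :: ps) :
    pvSplitQ (xs ++ l) = (xs ++ p) :: ps := by
  induction xs with
  | nil => simpa using h
  | cons x xs ih =>
    have hx : x ≠ '"' := hxs x (by simp)
    have := ih (fun c hc => hxs c (by simp [hc]))
    simp [List.cons_append, pvSplitQ, this, hx]

-- A's emitted chars followed by the pending run equal B's quote-escaping
theorem pvEsc_spec (cs : List Char) : ∀ k : Nat,
    pvBody k cs ++ pvTrail (List.replicate k '\\' ++ cs) = pvEsc (List.replicate k '\\' ++ cs) := by
  induction cs with
  | nil =>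
    intro k
    have h0 : pvSplitQ ([] : List Char) = [[]] := rfl
    have hpre := pvSplitQ_prepend (List.replicate k '\\') []
      (fun c hc => by simp [List.eq_of_mem_replicate hc]) [] [] h0
    have hpre' : pvSplitQ (List.replicate k '\\') = [List.replicate k '\\'] := by simpa using hpre
    simp [pvBody, pvTrail_repl, pvEsc, hpre']
  | cons c cs ih =>
    intro k
    by_cases hbs : c = '\\'
    · subst hbs
      have hrw : List.replicate k '\\' ++ '\\' :: cs = List.replicate (k + 1) '\\' ++ cs := by
        rw [List.replicate_succ']; simp
      rw [hrw, show pvBody k ('\\' :: cs) = pvBody (k + 1) cs from by simp [pvBody]]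
      exact ih (k + 1)
    · obtain ⟨p, ps, hsp⟩ := List.exists_cons_of_ne_nil (pvSplitQ_ne_nil cs)
      have ihz := ih 0
      simp only [List.replicate_zero, List.nil_append] at ihz
      by_cases hq : c = '"'
      · subst hq
        have hsp2 : pvSplitQ ('"' :: cs) = [] :: p :: ps := by
          simp [pvSplitQ, hsp]
        have hpre := pvSplitQ_prepend (List.replicate k '\\') ('"' :: cs)
          (fun c hc => by simp [List.eq_of_mem_replicate hc]) _ _ hsp2
        have hpre' : pvSplitQ (List.replicate k '\\' ++ '"' :: cs) = List.replicate k '\\' :: p :: ps := by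
          simpa using hpre
        have hdbl : pvDbl (List.replicate k '\\') = List.replicate (k * 2) '\\' := by
          simp [pvDbl]; omega
        rw [show pvBody k ('"' :: cs) =
            List.replicate (k * 2) '\\' ++ '\\' :: '"' :: pvBody 0 cs from by simp [pvBody],
          pvTrail_mid _ _ _ hbs]
        cases ps with
        | nil =>
          simp [pvEsc, hsp] at ihz
          simp [hpre', hdbl, ihz, pvEsc]
        | cons q qs =>
          simp [pvEsc, hsp] at ihz ⊢
          simp [hpre', hdbl, List.dropLast_cons₂]
          rw [ihz]
      · -- ordinary character
        have hsp2 : pvSplitQ (c :: cs) = (c :: p) :: ps := by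
          simp [pvSplitQ, hsp, hq]
        have hpre := pvSplitQ_prepend (List.replicate k '\\') (c :: cs)
          (fun x hx => by simp [List.eq_of_mem_replicate hx]) _ _ hsp2
        rw [show pvBody k (c :: cs) =
            List.replicate k '\\' ++ c :: pvBody 0 cs from by simp [pvBody, hbs, hq],
          pvTrail_mid _ _ _ hbs]
        cases ps with
        | nil =>
          simp [pvEsc, hsp] at ihz
          simp [pvEsc, hpre, ihz]
        | cons q qs =>
          have hdbl : pvDbl (List.replicate k '\\' ++ c :: p) = List.replicate k '\\' ++ c :: pvDbl p := by
            rw [pvDbl_eq, pvDbl_eq]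
            have h1 : pvTrail (List.replicate k '\\' ++ c :: p) = pvTrail p := pvTrail_mid _ _ _ hbs
            have h2 : pvTrail (c :: p) = pvTrail p := by
              have := pvTrail_mid [] p c hbs; simpa using this
            rw [h1]; simp
          simp [pvEsc, hsp] at ihz
          simp [pvEsc, hpre, hdbl, List.dropLast_cons₂]
          rw [ihz]

theorem pvEsc_spec0 (cs : List Char) : pvBody 0 cs ++ pvTrail cs = pvEsc cs := by
  have := pvEsc_spec cs 0
  simpa using this

theorem pvBody_no_trail (cs : List Char) : ∀ k, pvBody k cs ≠ [] → pvTrail (pvBody k cs) = [] := by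
  induction cs with
  | nil => intro k h; simp [pvBody] at h
  | cons c cs ih =>
    intro k h
    by_cases hbs : c = '\\'
    · subst hbs
      simp only [pvBody, reduceIte] at h ⊢
      exact ih (k + 1) h
    · by_cases hq : c = '"'
      · subst hq
        rw [show pvBody k ('"' :: cs) =
            List.replicate (k * 2) '\\' ++ '\\' :: '"' :: pvBody 0 cs from by simp [pvBody]]
        by_cases h0 : pvBody 0 cs = []
        · rw [h0, show List.replicate (k * 2) '\\' ++ '\\' :: '"' :: ([] : List Char) =
              (List.replicate (k * 2) '\\' ++ ['\\']) ++ '"' :: [] from by simp,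
            pvTrail_mid _ _ _ hbs]
          simp [pvTrail]
        · rw [show List.replicate (k * 2) '\\' ++ '\\' :: '"' :: pvBody 0 cs =
              (List.replicate (k * 2) '\\' ++ ['\\', '"']) ++ pvBody 0 cs from by simp]
          exact pvTrail_append_right _ _ h0 (ih 0 h0)
      · rw [show pvBody k (c :: cs) =
            List.replicate k '\\' ++ c :: pvBody 0 cs from by simp [pvBody, hbs, hq]]
        by_cases h0 : pvBody 0 cs = []
        · rw [h0, show List.replicate k '\\' ++ c :: ([] : List Char) =
              List.replicate k '\\' ++ c :: [] from rfl, pvTrail_mid _ _ _ hbs]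
          simp [pvTrail]
        · rw [show List.replicate k '\\' ++ c :: pvBody 0 cs =
              (List.replicate k '\\' ++ [c]) ++ pvBody 0 cs from by simp]
          exact pvTrail_append_right _ _ h0 (ih 0 h0)

theorem pvBody_nil_all (cs : List Char) : ∀ k, pvBody k cs = [] → ∀ c ∈ cs, c = '\\' := by
  induction cs with
  | nil => intro _ _ c hc; simp at hc
  | cons c cs ih =>
    intro k h d hd
    by_cases hbs : c = '\\'
    · subst hbs
      simp only [pvBody, reduceIte] at h
      rcases List.mem_cons.mp hd with h1 | h1
      · exact h1
      · exact ih (k + 1) h d h1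
    · by_cases hq : c = '"'
      · rw [show pvBody k (c :: cs) =
            List.replicate (k * 2) '\\' ++ '\\' :: '"' :: pvBody 0 cs from by simp [pvBody, hq]] at h
        simp at h
      · rw [show pvBody k (c :: cs) =
            List.replicate k '\\' ++ c :: pvBody 0 cs from by simp [pvBody, hbs, hq]] at h
        simp at h

theorem pvTrail_of_all (l : List Char) (h : ∀ c ∈ l, c = '\\') : pvTrail l = l := by
  have hl : l = List.replicate l.length '\\' := List.eq_replicate_iff.mpr ⟨rfl, h⟩
  rw [hl, pvTrail_repl]

theorem pvTrail_esc (arg : List Char) : pvTrail (pvEsc arg) = pvTrail arg := by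
  rw [← pvEsc_spec0]
  by_cases hb : pvBody 0 arg = []
  · rw [hb, List.nil_append, pvTrail_eq_replicate arg, pvTrail_repl]
  · conv_lhs => rw [pvTrail_eq_replicate arg]
    rw [pvTrail_append_repl, pvBody_no_trail arg 0 hb, List.nil_append, ← pvTrail_eq_replicate]

theorem pvDbl_esc (arg : List Char) : pvDbl (pvEsc arg) = pvEsc arg ++ pvTrail arg := by
  rw [pvDbl_eq, pvTrail_esc]

theorem pvEsc_ne_nil (arg : List Char) (h : arg ≠ []) : pvEsc arg ≠ [] := by
  intro he
  rw [← pvEsc_spec0] at he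
  have hb : pvBody 0 arg = [] := by
    cases hx : pvBody 0 arg with
    | nil => rfl
    | cons a l => rw [hx] at he; simp at he
  have hall := pvBody_nil_all arg 0 hb
  have ht : pvTrail arg = arg := pvTrail_of_all arg hall
  rw [hb, List.nil_append, ht] at he
  exact h he

-- the inner character loop of A computes pvBody and leaves the trailing backslash run pending
theorem pvInner (cs : List Char) : ∀ (res : List Char) (k : Nat),
    cs.foldl pvAChar (res, List.replicate k '\\')
    = (res ++ pvBody k cs, pvTrail (List.replicate k '\\' ++ cs)) := by
  induction cs with
  | nil => intro res k; simp [pvBody, pvTrail_repl]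
  | cons c cs ih =>
    intro res k
    rw [List.foldl_cons]
    by_cases hbs : c = '\\'
    · subst hbs
      rw [show pvAChar (res, List.replicate k '\\') '\\' = (res, List.replicate (k + 1) '\\') from by
          simp [pvAChar, List.replicate_succ'],
        ih res (k + 1),
        show pvBody k ('\\' :: cs) = pvBody (k + 1) cs from by simp [pvBody],
        show List.replicate k '\\' ++ '\\' :: cs = List.replicate (k + 1) '\\' ++ cs from by
          rw [List.replicate_succ']; simp]
    · by_cases hq : c = '"'
      · subst hq
        rw [show pvAChar (res, List.replicate k '\\') '"'
            = (res ++ List.replicate (k * 2) '\\' ++ ['\\', '"'], List.replicate 0 '\\') from by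
          simp [pvAChar, hbs],
          ih _ 0, pvTrail_mid _ _ _ hbs,
          show pvBody k ('"' :: cs) =
            List.replicate (k * 2) '\\' ++ '\\' :: '"' :: pvBody 0 cs from by simp [pvBody]]
        simp
      · rw [show pvAChar (res, List.replicate k '\\') c
            = (res ++ List.replicate k '\\' ++ [c], List.replicate 0 '\\') from by
          cases k <;> simp [pvAChar, hbs, hq],
          ih _ 0, pvTrail_mid _ _ _ hbs,
          show pvBody k (c :: cs) =
            List.replicate k '\\' ++ c :: pvBody 0 cs from by simp [pvBody, hbs, hq]]
        simp

theorem pvQuote_eq (arg : List Char) :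
    pvQuote arg = if (arg.contains ' ' || arg.contains '\t' || arg.isEmpty) then
      '"' :: (pvDbl (pvEsc arg) ++ ['"']) else pvEsc arg := rfl

-- one outer-loop iteration of A equals B's per-argument quoting (after the separator)
theorem pvAStep_eq (r arg : List Char) :
    pvAStep r arg = (if r.isEmpty then [] else r ++ [' ']) ++ pvQuote arg := by
  rw [pvQuote_eq]
  simp only [pvAStep]
  by_cases hnq : (arg.contains ' ' || arg.contains '\t' || arg.isEmpty) = true
  · simp only [hnq, reduceIte]
    have hfold := pvInner arg ((if r.isEmpty then r else r ++ [' ']) ++ ['"']) 0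
    rw [List.replicate_zero, List.nil_append] at hfold
    rw [hfold]
    rw [pvDbl_esc, ← pvEsc_spec0]
    by_cases ht : pvTrail arg = [] <;> by_cases hr : r.isEmpty <;>
      simp [ht, hr, List.isEmpty_iff] <;> simp_all [List.isEmpty_iff]
  · simp only [hnq, Bool.false_eq_true, reduceIte]
    have hfold := pvInner arg (if r.isEmpty then r else r ++ [' ']) 0
    rw [List.replicate_zero, List.nil_append] at hfold
    rw [hfold]
    rw [← pvEsc_spec0]
    by_cases ht : pvTrail arg = [] <;> by_cases hr : r.isEmpty <;>
      simp [ht, hr, List.isEmpty_iff] <;> simp_all [List.isEmpty_iff]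

theorem pvQuote_ne_nil (arg : List Char) : pvQuote arg ≠ [] := by
  rw [pvQuote_eq]
  by_cases hnq : (arg.contains ' ' || arg.contains '\t' || arg.isEmpty) = true
  · rw [if_pos hnq]; simp
  · rw [if_neg hnq]
    have harg : arg ≠ [] := by
      intro h; subst h; simp at hnq
    exact pvEsc_ne_nil arg harg

theorem pvFold (l : List String) : ∀ r : List Char, r ≠ [] →
    l.foldl (fun r a => pvAStep r a.toList) r
      = r ++ (l.map (fun a => ' ' :: pvQuote a.toList)).flatten := by
  induction l with
  | nil => intro r _; simp
  | cons a l ih =>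
    intro r hr
    rw [List.foldl_cons, pvAStep_eq, if_neg (by simpa using hr)]
    rw [ih _ (by simp)]
    simp

theorem pvIntercalate (x : List Char) (xs : List (List Char)) :
    List.intercalate [' '] (x :: xs) = x ++ (xs.map (fun q => ' ' :: q)).flatten := by
  induction xs generalizing x with
  | nil => simp [List.intercalate]
  | cons y ys ih =>
    have := ih y
    simp only [List.intercalate, List.intersperse] at this ⊢
    simp [this]

theorem list2cmdline_spec : Claim_equal_list2cmdline := by
  intro seq _
  unfold Spec_list2cmdline list2cmdline list2cmdline_alt
  cases seq with
  | nil => rfl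
  | cons a l =>
    rw [List.foldl_cons,
      show pvAStep [] a.toList = pvQuote a.toList from by
        rw [pvAStep_eq]; simp,
      pvFold l _ (pvQuote_ne_nil a.toList),
      List.map_cons, pvIntercalate]
    simp [List.map_map, Function.comp_def]
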